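-- pv_equiv track=rewrite | github.com/scientistkev/advent-of-code-2025 | challenges/day_7.py | parse_problems_right_to_left
-- ===== SOURCE A (Python) =====
-- def parse_problems_right_to_left(lines):
--     # Convert lines to a 2D grid of characters
--     # Pad all lines to the same length
--     max_len = max(len(line) for line in lines) if lines else 0
--     grid = []
--     for line in lines:
--         padded_line = line.ljust(max_len)
--         grid.append(list(padded_line))
--
--     if not grid:
--         return []
--
--     num_rows = len(grid)
--     num_cols = max_len
--
--     # The last row contains operations
--     operations_row = grid[-1]
--     number_rows = grid[:-1]
--
--     problems = []
--     col = num_cols - 1  # Start from the rightmost column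
--
--     while col >= 0:
--         # Skip columns that are all spaces (problem separators)
--         if all(row[col] == ' ' for row in grid):
--             col -= 1
--             continue
--
--         # Find the left boundary of this problem
--         problem_start_col = col
--         while problem_start_col >= 0:
--             if all(row[problem_start_col] == ' ' for row in grid):
--                 problem_start_col += 1
--                 break
--             problem_start_col -= 1
--         if problem_start_col < 0:
--             problem_start_col = 0
--
--         # Parse numbers from right to left
--         # Key insight: Each column represents one number
--         # Within each column, digits are arranged top to bottom (MSD to LSD)
--         # Read each column from top to bottom to get the digits, forming the number
--
--         numbers = []
--         current_col = col
--
--         while current_col >= problem_start_col: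
--             # Skip if this column is all spaces
--             if all(row[current_col] == ' ' for row in number_rows):
--                 current_col -= 1
--                 continue
--
--             # Read this column from top to bottom to extract digits
--             col_digits = []
--             for row in number_rows:
--                 char = row[current_col]
--                 if char.isdigit():
--                     col_digits.append(char)
--
--             # If we found digits, form the number
--             if col_digits:
--                 # Digits are read top to bottom, which gives MSD to LSD
--                 num_str = ''.join(col_digits)
--                 try:
--                     numbers.append(int(num_str))
--                 except ValueError:
--                     pass
--
--             current_col -= 1
--
--         # Get the operation for this problem (look in the operations row)
--         operation = None
--         for c in range(problem_start_col, col + 1):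
--             op_char = operations_row[c]
--             if op_char in ('+', '*'):
--                 operation = op_char
--                 break
--
--         if numbers and operation:
--             # Numbers are collected right to left, which is the correct order
--             problems.append((numbers, operation))
--
--         col = problem_start_col - 1
--
--     return problems
-- ===== SOURCE B (Python) =====
-- def parse_problems_right_to_left(lines):
--     # One right-to-left pass over the columns, accumulating the current
--     # problem's numbers and operation and flushing at separator columns.
--     if not lines:
--         return []
--     width = max(len(line) for line in lines)
--     grid = [line.ljust(width) for line in lines]
--     ops_row = grid[-1]
--     num_rows = grid[:-1]
--     problems = []
--     numbers = []
--     operation = None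
--     for c in range(width - 1, -1, -1):
--         if all(row[c] == ' ' for row in grid):
--             if numbers and operation:
--                 problems.append((numbers, operation))
--             numbers = []
--             operation = None
--             continue
--         digits = [row[c] for row in num_rows if row[c].isdigit()]
--         if digits:
--             numbers.append(int(''.join(digits)))
--         if ops_row[c] in ('+', '*'):
--             operation = ops_row[c]
--     if numbers and operation:
--         problems.append((numbers, operation))
--     return problems
-- ===== Notes on version B (the rewrite author's own statement) =====
-- stated objective: simpler
-- what changed: A scans columns right-to-left, and at each problem re-scans left for the block boundary and then runs two more per-block loops (numbers right-to-left, operator left-to-right); B is a single right-to-left pass over the columns that accumulates the current problem's numbers and operator (overwriting the operator so the leftmost wins) and flushes it at each separator column.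
import Mathlib
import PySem

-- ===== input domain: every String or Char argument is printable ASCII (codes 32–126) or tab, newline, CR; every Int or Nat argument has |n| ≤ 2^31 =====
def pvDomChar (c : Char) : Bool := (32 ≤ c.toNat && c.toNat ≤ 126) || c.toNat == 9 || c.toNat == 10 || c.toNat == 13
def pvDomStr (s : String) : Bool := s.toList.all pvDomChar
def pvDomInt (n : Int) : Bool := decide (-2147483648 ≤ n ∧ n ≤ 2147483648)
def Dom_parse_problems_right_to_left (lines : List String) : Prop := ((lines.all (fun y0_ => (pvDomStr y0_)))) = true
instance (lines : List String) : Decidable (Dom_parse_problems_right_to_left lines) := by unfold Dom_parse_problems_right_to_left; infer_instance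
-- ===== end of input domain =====

-- B replaces A's nested right-to-left block scan (left-boundary re-scan + per-block inner loops)
-- with a single right-to-left column pass accumulating the current problem; objective: simpler, same cost.


-- ===== shared helpers (the same Python constructs appear in both programs) =====
-- row[c] — in both programs every access is in range, so the default is never returned
def pvCell (row : List Char) (c : Int) : Char := (PySem.List.pyGet? row c).getD ' '
-- all(row[c] == ' ' for row in g)
def pvSepAll (g : List (List Char)) (c : Int) : Bool := g.all (fun row => pvCell row c == ' ')
-- [row[c] for row in nr if row[c].isdigit()]
def pvColDigits (nr : List (List Char)) (c : Int) : List Char :=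
  nr.filterMap (fun row => if PySem.Chars.isdigit (pvCell row c) then some (pvCell row c) else none)
-- line.ljust(w) (space padding; exact: no pad when w ≤ len)
def pvLjust (s : String) (w : Int) : List Char :=
  s.toList ++ List.replicate (w - (s.toList.length : Int)).toNat ' '
-- if numbers and operation: problems.append((numbers, operation))
def pvFlush (nums : List Int) (op : Option Char) (rest : List (List Int × String)) :
    List (List Int × String) :=
  if nums.isEmpty then rest
  else match op with
    | some o => (nums, String.ofList [o]) :: rest
    | none => rest

-- ===== PORT A =====
-- A's left-boundary search: while start >= 0: if all-space col: start += 1; break; start -= 1 / clamp to 0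
def pvFindStart (g : List (List Char)) (s : Int) : Int :=
  if s < 0 then 0
  else if pvSepAll g s then s + 1
  else pvFindStart g (s - 1)
termination_by (s + 1).toNat
decreasing_by omega

theorem pvFindStart_le (g : List (List Char)) (s : Int) (hs : -1 ≤ s) :
    pvFindStart g s ≤ s + 1 := by
  induction hn : (s + 1).toNat generalizing s with
  | zero =>
    have h1 : s = -1 := by omega
    subst h1
    rw [pvFindStart, if_pos (by omega : (-1:Int) < 0)]
    omega
  | succ n ih =>
    rw [pvFindStart]
    split
    · omega
    · split
      · omega
      · have := ih (s - 1) (by omega) (by omega)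
        omega

theorem pvFindStart_le_self (g : List (List Char)) (s : Int) (h0 : 0 ≤ s)
    (h : pvSepAll g s = false) : pvFindStart g s ≤ s := by
  rw [pvFindStart, if_neg (show ¬ s < 0 by omega), if_neg (by simp [h])]
  have := pvFindStart_le g (s - 1) (by omega)
  omega

-- A's inner numbers loop: current_col from col down to problem_start_col
def pvNumbersA (nr : List (List Char)) (startc cur : Int) : List Int :=
  if cur < startc then []
  else if pvSepAll nr cur then pvNumbersA nr startc (cur - 1)
  else
    let ds := pvColDigits nr cur
    if ds.isEmpty then pvNumbersA nr startc (cur - 1)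
    else match PySem.Int.ofChars? ds with   -- int(''.join(col_digits)) in try/except
      | some n => n :: pvNumbersA nr startc (cur - 1)
      | none => pvNumbersA nr startc (cur - 1)
termination_by (cur + 1 - startc).toNat
decreasing_by all_goals omega

-- for c in range(a, b): if ops[c] in ('+','*'): operation = ops[c]; break
def pvFindOpA (ops : List Char) (a b : Int) : Option Char :=
  (PySem.List.pyRange a b).findSome? (fun c =>
    let ch := pvCell ops c
    if ch == '+' || ch == '*' then some ch else none)

-- A's main while loop over columns, right to left
def pvLoopA (g nr : List (List Char)) (ops : List Char) (col : Int) :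
    List (List Int × String) :=
  if h : col < 0 then []
  else if hs : pvSepAll g col then pvLoopA g nr ops (col - 1)
  else
    let s := pvFindStart g col
    pvFlush (pvNumbersA nr s col) (pvFindOpA ops s (col + 1)) (pvLoopA g nr ops (s - 1))
termination_by (col + 1).toNat
decreasing_by
  · omega
  · have := pvFindStart_le_self g col (by omega) (by simpa using hs)
    omega

def parse_problems_right_to_left (lines : List String) : List (List Int × String) :=
  let maxLen : Int := if lines.isEmpty then 0 else (PySem.List.max? (lines.map PySem.Str.len) id).getD 0
  let grid : List (List Char) := lines.map (fun line => pvLjust line maxLen)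
  if grid.isEmpty then []
  else
    let opsRow := (PySem.List.pyGet? grid (-1)).getD []        -- grid[-1]
    let numberRows := PySem.List.slice grid none (some (-1))   -- grid[:-1]
    pvLoopA grid numberRows opsRow (maxLen - 1)

-- ===== PORT B =====
-- B's single pass: for c in range(width-1, -1, -1), accumulating (numbers, operation),
-- flushing at separator columns; final flush at the left edge.
def pvScanB (g nr : List (List Char)) (ops : List Char) (c : Int)
    (nums : List Int) (op : Option Char) : List (List Int × String) :=
  if c < 0 then pvFlush nums op []
  else if pvSepAll g c then pvFlush nums op (pvScanB g nr ops (c - 1) [] none)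
  else
    let ds := pvColDigits nr c
    let nums' := if ds.isEmpty then nums else nums ++ (PySem.Int.ofChars? ds).toList
    let ch := pvCell ops c
    let op' := if ch == '+' || ch == '*' then some ch else op
    pvScanB g nr ops (c - 1) nums' op'
termination_by (c + 1).toNat
decreasing_by all_goals omega

def parse_problems_right_to_left_alt (lines : List String) : List (List Int × String) :=
  if lines.isEmpty then []
  else
    let width : Int := (PySem.List.max? (lines.map PySem.Str.len) id).getD 0
    let grid : List (List Char) := lines.map (fun line => pvLjust line width)
    let opsRow := (PySem.List.pyGet? grid (-1)).getD []        -- grid[-1]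
    let numberRows := PySem.List.slice grid none (some (-1))   -- grid[:-1]
    pvScanB grid numberRows opsRow (width - 1) [] none

-- ===== PRECONDITION & SPEC =====
def Spec_parse_problems_right_to_left (lines : List String) (out : List (List Int × String)) : Prop := out = parse_problems_right_to_left_alt lines
instance (lines : List String) (out : List (List Int × String)) : Decidable (Spec_parse_problems_right_to_left lines out) := by unfold Spec_parse_problems_right_to_left; infer_instance

-- ===== CLAIM (what is proved, stated in full; the proofs are below) =====
def Claim_equal_parse_problems_right_to_left : Prop := ∀ (lines : List String), Dom_parse_problems_right_to_left lines → Spec_parse_problems_right_to_left lines (parse_problems_right_to_left lines)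

-- ===== LEMMAS AND PROOFS =====

-- the number contributed by a single column (possibly none)
def pvDNum (nr : List (List Char)) (c : Int) : List Int :=
  if (pvColDigits nr c).isEmpty then [] else (PySem.Int.ofChars? (pvColDigits nr c)).toList

-- the operator candidate of a single column
def pvOpAt (ops : List Char) (c : Int) : Option Char :=
  if pvCell ops c == '+' || pvCell ops c == '*' then some (pvCell ops c) else none

theorem sep_colDigits (nr : List (List Char)) (c : Int) (h : pvSepAll nr c = true) :
    pvColDigits nr c = [] := by
  induction nr with
  | nil => rfl
  | cons row rest ih =>
    simp only [pvSepAll, List.all_cons, Bool.and_eq_true, beq_iff_eq] at h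
    have h2 : pvColDigits rest c = [] := ih (by simp [pvSepAll, h.2])
    simp only [pvColDigits, List.filterMap_cons, h.1] at h2 ⊢
    simp [h2, show PySem.Chars.isdigit ' ' = false by decide]

theorem numbersA_bot (nr : List (List Char)) (s cur : Int) (h : cur < s) :
    pvNumbersA nr s cur = [] := by
  rw [pvNumbersA]; simp [h]

theorem numbersA_step (nr : List (List Char)) (s cur : Int) (h : s ≤ cur) :
    pvNumbersA nr s cur = pvDNum nr cur ++ pvNumbersA nr s (cur - 1) := by
  rw [pvNumbersA, if_neg (show ¬ cur < s by omega)]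
  by_cases hsep : pvSepAll nr cur
  · rw [if_pos hsep]
    simp [pvDNum, sep_colDigits nr cur hsep]
  · rw [if_neg (by simp [hsep])]
    simp only [pvDNum]
    by_cases he : (pvColDigits nr cur).isEmpty
    · simp [he]
    · simp only [he, Bool.false_eq_true, if_false]
      cases hof : PySem.Int.ofChars? (pvColDigits nr cur) <;> simp

theorem findOpA_empty (ops : List Char) (a : Int) : pvFindOpA ops a a = none := by
  simp [pvFindOpA, PySem.List.pyRange_one_eq_nil (le_refl a)]

theorem findOpA_succ (ops : List Char) (a c : Int) (h : a ≤ c) :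
    pvFindOpA ops a (c + 1) = (pvFindOpA ops a c).or (pvOpAt ops c) := by
  simp only [pvFindOpA, PySem.List.pyRange_one_succ_right h, List.findSome?_append]
  congr 1
  simp [pvOpAt]

theorem findOpA_single (ops : List Char) (a : Int) :
    pvFindOpA ops a (a + 1) = pvOpAt ops a := by
  rw [findOpA_succ ops a a (le_refl a), findOpA_empty]
  rfl

theorem flush_nil (op : Option Char) (rest : List (List Int × String)) :
    pvFlush [] op rest = rest := by
  simp [pvFlush]

-- A's boundary search finds the start of the maximal block of non-separator columns
theorem findStart_spec (g : List (List Char)) (c : Int) (h0 : 0 ≤ c)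
    (hsep : pvSepAll g c = false) :
    0 ≤ pvFindStart g c ∧ pvFindStart g c ≤ c ∧
    (∀ j, pvFindStart g c ≤ j → j ≤ c → pvSepAll g j = false) ∧
    (pvFindStart g c = 0 ∨ (1 ≤ pvFindStart g c ∧ pvSepAll g (pvFindStart g c - 1) = true)) := by
  induction hn : c.toNat generalizing c with
  | zero =>
    have hc : c = 0 := by omega
    subst hc
    have e1 : pvFindStart g 0 = 0 := by
      rw [pvFindStart, if_neg (by omega), if_neg (by simp [hsep])]
      rw [pvFindStart, if_pos (by omega : (0:Int) - 1 < 0)]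
    rw [e1]
    refine ⟨le_refl 0, le_refl 0, ?_, Or.inl rfl⟩
    intro j h1 h2
    have hj : j = 0 := by omega
    rw [hj]; exact hsep
  | succ n ih =>
    have e1 : pvFindStart g c = pvFindStart g (c - 1) := by
      rw [pvFindStart, if_neg (by omega), if_neg (by simp [hsep])]
    rw [e1]
    by_cases hprev : pvSepAll g (c - 1)
    · have e2 : pvFindStart g (c - 1) = c := by
        rw [pvFindStart, if_neg (by omega), if_pos hprev]
        omega
      rw [e2]
      refine ⟨by omega, le_refl c, ?_, Or.inr ⟨by omega, hprev⟩⟩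
      intro j h1 h2
      have hj : j = c := by omega
      rw [hj]; exact hsep
    · obtain ⟨p1, p2, p3, p4⟩ := ih (c - 1) (by omega) (by simpa using hprev) (by omega)
      refine ⟨p1, by omega, ?_, p4⟩
      intro j h1 h2
      by_cases hj : j ≤ c - 1
      · exact p3 j h1 hj
      · have hjc : j = c := by omega
        rw [hjc]; exact hsep

-- B's scan across a block of non-separator columns [s, c]
theorem dnum_append (nr : List (List Char)) (c : Int) (nums : List Int) :
    (if (pvColDigits nr c).isEmpty then nums
     else nums ++ (PySem.Int.ofChars? (pvColDigits nr c)).toList) = nums ++ pvDNum nr c := by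
  unfold pvDNum
  by_cases he : (pvColDigits nr c).isEmpty <;> simp [he]

theorem opAt_or (ops : List Char) (c : Int) (op : Option Char) :
    (if pvCell ops c == '+' || pvCell ops c == '*' then some (pvCell ops c) else op)
      = (pvOpAt ops c).or op := by
  unfold pvOpAt
  by_cases h : pvCell ops c == '+' || pvCell ops c == '*' <;> simp [h]

theorem scanB_block (g nr : List (List Char)) (ops : List Char) (s : Int) (h0 : 0 ≤ s) :
    ∀ (k : Nat) (c : Int), c = s + k →
    (∀ j, s ≤ j → j ≤ c → pvSepAll g j = false) →
    ∀ (nums : List Int) (op : Option Char),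
      pvScanB g nr ops c nums op
        = pvScanB g nr ops (s - 1) (nums ++ pvNumbersA nr s c)
            ((pvFindOpA ops s (c + 1)).or op) := by
  intro k
  induction k with
  | zero =>
    intro c hcq hns nums op
    have hcs : c = s := by omega
    subst hcs
    rw [pvScanB, if_neg (show ¬ c < 0 by omega), if_neg (by simp [hns c le_rfl le_rfl])]
    simp only [dnum_append, opAt_or]
    rw [numbersA_step nr c c le_rfl, numbersA_bot nr c (c - 1) (by omega), findOpA_single,
      List.append_nil]
  | succ k ih =>
    intro c hcq hns nums op
    rw [pvScanB, if_neg (show ¬ c < 0 by omega), if_neg (by simp [hns c (by omega) le_rfl])]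
    simp only [dnum_append, opAt_or]
    rw [ih (c - 1) (by omega) (fun j h1 h2 => hns j h1 (by omega)),
      show c - 1 + 1 = c from by omega]
    rw [numbersA_step nr s c (by omega), findOpA_succ ops s c (by omega),
      List.append_assoc, Option.or_assoc]

-- main invariant: B's scan started fresh at any column equals A's loop there
theorem scanB_eq_loopA (g nr : List (List Char)) (ops : List Char) :
    ∀ (n : Nat) (c : Int), (c + 1).toNat ≤ n →
    pvScanB g nr ops c [] none = pvLoopA g nr ops c := by
  intro n
  induction n with
  | zero =>
    intro c hcn
    have hc : c < 0 := by omega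
    rw [pvScanB, if_pos hc, pvLoopA, dif_pos hc, flush_nil]
  | succ n ih =>
    intro c hcn
    by_cases hc : c < 0
    · rw [pvScanB, if_pos hc, pvLoopA, dif_pos hc, flush_nil]
    · by_cases hsep : pvSepAll g c
      · rw [pvScanB, if_neg hc, if_pos hsep, flush_nil, pvLoopA, dif_neg hc, dif_pos hsep]
        exact ih (c - 1) (by omega)
      · obtain ⟨p1, p2, p3, p4⟩ :=
          findStart_spec g c (by omega) (by simpa using hsep)
        conv_rhs => rw [pvLoopA]
        rw [dif_neg hc, dif_neg hsep]
        rw [scanB_block g nr ops (pvFindStart g c) p1 (c - pvFindStart g c).toNat c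
          (by omega) p3 [] none]
        simp only [List.nil_append, Option.or_none]
        rcases p4 with hz | ⟨h1, h2⟩
        · rw [hz]
          rw [pvScanB, if_pos (by omega : (0:Int) - 1 < 0)]
          conv_rhs => rw [pvLoopA]
          rw [dif_pos (by omega : (0:Int) - 1 < 0)]
        · rw [pvScanB, if_neg (show ¬ pvFindStart g c - 1 < 0 by omega), if_pos h2]
          conv_rhs => rw [pvLoopA]
          rw [dif_neg (show ¬ pvFindStart g c - 1 < 0 by omega), dif_pos h2]
          congr 1
          exact ih (pvFindStart g c - 1 - 1) (by omega)

-- ===== VERDICT (by name: the statement is the Claim_ definition above) =====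
theorem parse_problems_right_to_left_spec : Claim_equal_parse_problems_right_to_left := by
  intro lines _
  unfold Spec_parse_problems_right_to_left parse_problems_right_to_left
    parse_problems_right_to_left_alt
  by_cases h : lines.isEmpty
  · simp [h]
  · simp only [h, Bool.false_eq_true, if_false]
    have hg : (lines.map (fun line =>
        pvLjust line ((PySem.List.max? (lines.map PySem.Str.len) id).getD 0))).isEmpty = false := by
      simp_all
    simp only [hg, Bool.false_eq_true, if_false]
    exact (scanB_eq_loopA _ _ _ (((PySem.List.max? (lines.map PySem.Str.len) id).getD 0 - 1) + 1).toNat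
      _ (le_refl _)).symm
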